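-- pv_equiv track=rewrite | github.com/kanngji/thisisCodingTest | programmers/lv0/70.py | solution
-- ===== SOURCE A (Python) =====
-- def fac(n):
--     if n==1:
--         return 1
--     else:
--         return n * fac(n-1)
--
-- def solution(n):
--     answer = 1
--     result=0
--     while(result<=n):
--         result=fac(answer)
--
--         dap=answer
--         answer+=1
--
--     return dap-1
-- ===== SOURCE B (Python) =====
-- def solution(n):
--     i = 1
--     fact = 1
--     while fact <= n:
--         i += 1
--         fact *= i
--     return i - 1
-- ===== Notes on version B (the rewrite author's own statement) =====
-- stated objective: simpler
-- what changed: Replaced the recursive factorial recomputed from scratch each iteration and the forced-first-iteration loop with three state variables by a single loop threading a running product in two variables, returning i-1 directly.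
-- crash fix: On n < 0 A raises UnboundLocalError (its loop body never runs, so dap is unbound) while B returns 0. — e.g. on solution(-1): A raises UnboundLocalError, B returns 0
import Mathlib
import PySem

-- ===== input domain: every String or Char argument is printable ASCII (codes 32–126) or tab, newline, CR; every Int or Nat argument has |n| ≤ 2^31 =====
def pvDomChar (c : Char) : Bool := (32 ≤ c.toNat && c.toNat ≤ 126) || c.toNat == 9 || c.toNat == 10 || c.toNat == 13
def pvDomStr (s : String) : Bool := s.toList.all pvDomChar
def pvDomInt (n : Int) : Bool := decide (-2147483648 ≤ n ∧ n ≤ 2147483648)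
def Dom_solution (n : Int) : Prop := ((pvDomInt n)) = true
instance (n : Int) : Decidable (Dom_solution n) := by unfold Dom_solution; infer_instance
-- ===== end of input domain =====

-- B replaces A's recursive factorial (recomputed whole each iteration) and three-variable
-- forced-first-iteration loop by one loop threading a running product; simpler, same values on n ≥ 0.

-- ===== PORT A =====
-- fac: Python recurses on n-1 with base n==1; for n ≤ 0 Python diverges (never reached from
-- solution), the port returns 1 there so the recursion is well-founded — exact for n ≥ 1.
def fac (n : Int) : Int :=
  if n ≤ 1 then 1 else n * fac (n - 1)
termination_by n.toNat
decreasing_by omega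

-- A's while loop, made total with fuel (enough for every n in Dom: the loop runs at most
-- n+2 times since fac a ≥ a); state (result, answer, dap) exactly as in the Python.
def loopA (fuel : Nat) (n result answer dap : Int) : Int :=
  match fuel with
  | 0 => dap - 1
  | fuel + 1 =>
    if result ≤ n then loopA fuel n (fac answer) (answer + 1) answer
    else dap - 1

def solution (n : Int) : Int := loopA (n.toNat + 2) n 0 1 0

-- ===== PORT B =====
-- B's while loop with fuel (the loop runs at most n times: fact = i! ≥ i while it runs).
def loopB (fuel : Nat) (n i fact : Int) : Int :=
  match fuel with
  | 0 => i - 1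
  | fuel + 1 =>
    if fact ≤ n then loopB fuel n (i + 1) (fact * (i + 1))
    else i - 1

def solution_alt (n : Int) : Int := loopB (n.toNat + 1) n 1 1

-- ===== PRECONDITION & SPEC =====
-- Pre_ excludes n < 0: there A's loop body never runs and `dap` is unbound, so A raises
-- UnboundLocalError (returns no value).
def Pre_solution (n : Int) : Prop := 0 ≤ n
instance (n : Int) : Decidable (Pre_solution n) := by unfold Pre_solution; infer_instance
def pvWitness_solution : Int := (6)

-- On n < 0 A raises UnboundLocalError (its loop body never runs, so dap is unbound) while B returns 0.
def Raises_solution (n : Int) : Prop := n < 0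
instance (n : Int) : Decidable (Raises_solution n) := by unfold Raises_solution; infer_instance
def pvRaiseWitness_solution : Int := (-1)
def pvRaiseWitnessOut_solution : Int := 0

def Spec_solution (n : Int) (out : Int) : Prop := out = solution_alt n
instance (n : Int) (out : Int) : Decidable (Spec_solution n out) := by unfold Spec_solution; infer_instance

-- ===== CLAIM (what is proved, stated in full; the proofs are below) =====
def Claim_equal_solution : Prop := ∀ (n : Int), Dom_solution n → Pre_solution n → Spec_solution n (solution n)
def Claim_raises_solution : Prop := (∀ (n : Int), Dom_solution n → Raises_solution n → ¬ Pre_solution n) ∧ (Dom_solution (pvRaiseWitness_solution) ∧ Raises_solution (pvRaiseWitness_solution) ∧ solution_alt (pvRaiseWitness_solution) = pvRaiseWitnessOut_solution)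

-- ===== LEMMAS AND PROOFS =====

theorem fac_succ (i : Int) (hi : 1 ≤ i) : fac (i + 1) = fac i * (i + 1) := by
  rw [fac]
  rw [if_neg (by omega)]
  simp [mul_comm]

-- Invariant linking A's loop state (fac i, i+1, i) to B's (i, fac i).
theorem loopA_eq_loopB (fuel : Nat) (n : Int) :
    ∀ i : Int, 1 ≤ i → loopA (fuel + 1) n (fac i) (i + 1) i = loopB (fuel + 1) n i (fac i) := by
  induction fuel with
  | zero =>
    intro i _
    simp only [loopA, loopB]
  | succ fuel ih =>
    intro i hi
    simp only [loopA, loopB]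
    by_cases h : fac i ≤ n
    · rw [if_pos h, if_pos h, ← fac_succ i hi]
      exact ih (i + 1) (by omega)
    · simp only [if_neg h]

theorem solution_spec : Claim_equal_solution := by
  intro n _ hpre
  unfold Spec_solution solution solution_alt
  have h2 : n.toNat + 2 = (n.toNat + 1) + 1 := rfl
  rw [h2, loopA]
  rw [if_pos (show 0 ≤ n from hpre)]
  have h1 : fac 1 = 1 := by rw [fac]; simp
  calc loopA (n.toNat + 1) n (fac 1) (1 + 1) 1
      = loopB (n.toNat + 1) n 1 (fac 1) := loopA_eq_loopB n.toNat n 1 (by omega)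
    _ = loopB (n.toNat + 1) n 1 1 := by rw [h1]

def solution_raises : Claim_raises_solution := by
  unfold Claim_raises_solution
  constructor
  · intro n _ hr hp
    exact absurd hp (by unfold Pre_solution Raises_solution at *; omega)
  · refine ⟨by decide, by decide, by decide⟩
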